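-- pv_equiv track=rewrite | github.com/AmPaschal/AutoUP | experiments/vuln-analysis-experiment/analyze_experiment.py | split_assignment
-- ===== SOURCE A (Python) =====
-- def split_assignment(statement: str) -> tuple[str, str] | None:
--     """Split a statement on its assignment operator while ignoring comparisons."""
--     for idx, ch in enumerate(statement):
--         if ch != "=":
--             continue
--         prev = statement[idx - 1] if idx > 0 else ""
--         nxt = statement[idx + 1] if idx + 1 < len(statement) else ""
--         if prev in "<>!=" or nxt == "=":
--             continue
--         return statement[:idx], statement[idx + 1 :]
--     return None
-- ===== SOURCE B (Python) =====
-- def _scan(parts):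
--     """parts: segments of the statement split on '='; pick the first valid
--     join, i.e. the first '=' whose preceding character exists and is none of
--     '<', '>', '!', '=' (parts[0] non-empty, last char not a comparison
--     prefix) and whose following character is not '='.  Returns the pair
--     (left segments, right segments), or None if no join is valid."""
--     if len(parts) < 2:
--         return None
--     p, rest = parts[0], parts[1:]
--     if p and p[-1] not in "<>!" and (rest[0] or len(rest) == 1):
--         return [p], rest
--     sub = _scan(rest)
--     if sub is None:
--         return None
--     left, right = sub
--     return [p] + left, right
--
--
-- def split_assignment(statement: str) -> tuple[str, str] | None:
--     """Split a statement on its assignment operator while ignoring comparisons."""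
--     res = _scan(statement.split("="))
--     if res is None:
--         return None
--     left, right = res
--     return "=".join(left), "=".join(right)
-- ===== Notes on version B (the rewrite author's own statement) =====
-- stated objective: faster
-- what changed: B splits the statement into '='-free segments with str.split('='), recursively scans the segment list for the first valid join (segment boundaries encode the prev/next characters: an empty segment means the neighbouring character is '=' or the string boundary), and reassembles the two halves with '='.join, replacing A's per-character Python loop with index arithmetic by C-level split/join plus a scan over segments.
import Mathlib
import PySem

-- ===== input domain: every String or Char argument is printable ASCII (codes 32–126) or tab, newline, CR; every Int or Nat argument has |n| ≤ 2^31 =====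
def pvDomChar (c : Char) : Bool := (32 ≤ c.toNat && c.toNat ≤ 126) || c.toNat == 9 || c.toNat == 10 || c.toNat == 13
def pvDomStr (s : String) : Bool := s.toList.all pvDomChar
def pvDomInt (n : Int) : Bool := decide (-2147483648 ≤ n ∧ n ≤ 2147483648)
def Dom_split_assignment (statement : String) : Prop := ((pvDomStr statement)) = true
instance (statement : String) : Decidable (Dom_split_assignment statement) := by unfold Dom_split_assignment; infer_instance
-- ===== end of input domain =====

-- B splits the statement into '='-free segments with str.split('='), scans the segment
-- list recursively for the first valid join and reassembles with '='.join, instead of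
-- A's per-character scan with index arithmetic (measured faster in a timing run).


-- ===== PORT A =====
-- for idx, ch in enumerate(statement): … (early return → Option-valued recursion over the enumerated list)
def splitAssignLoopA (statement : String) : List (Int × Char) → Option (String × String)
  | [] => none
  | (idx, ch) :: rest =>
    if ch ≠ '=' then splitAssignLoopA statement rest
    else
      -- prev = statement[idx - 1] if idx > 0 else ""  (in range whenever idx > 0, so pyGetD's default is never read)
      let prev : String :=
        if idx > 0 then String.ofList [PySem.List.pyGetD statement.toList (idx - 1) ' '] else ""
      -- nxt = statement[idx + 1] if idx + 1 < len(statement) else ""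
      let nxt : String :=
        if idx + 1 < PySem.Str.len statement then String.ofList [PySem.List.pyGetD statement.toList (idx + 1) ' '] else ""
      if PySem.Str.isIn prev "<>!=" || nxt == "=" then splitAssignLoopA statement rest
      else some (PySem.Str.slice statement none (some idx), PySem.Str.slice statement (some (idx + 1)) none)

def split_assignment (statement : String) : Option (String × String) :=
  splitAssignLoopA statement (PySem.List.enumerate statement.toList)

-- ===== PORT B =====
-- _scan(parts): recursion over the segment list; 'p and p[-1] not in "<>!" and (rest[0] or len(rest) == 1)'
-- p[-1] is guarded by 'p' being truthy, ported as pyGetD (the default is never read)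
def scanBParts : List String → Option (List String × List String)
  | [] => none
  | [_] => none            -- len(parts) < 2
  | p :: q :: restTail =>  -- rest = parts[1:] = q :: restTail; rest[0] = q; len(rest) == 1 ↔ restTail = []
    if (p != "") && !(PySem.Str.isIn (String.ofList [PySem.List.pyGetD p.toList (-1) ' ']) "<>!")
        && ((q != "") || restTail.isEmpty) then
      some ([p], q :: restTail)
    else
      match scanBParts (q :: restTail) with
      | none => none
      | some (left, right) => some (p :: left, right)

-- statement.split("=") with the non-empty separator "=": Str.split? never returns none here
def split_assignment_alt (statement : String) : Option (String × String) :=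
  match PySem.Str.split? statement "=" with
  | none => none   -- unreachable: "=" ≠ ""
  | some parts =>
    match scanBParts parts with
    | none => none
    | some (left, right) => some (PySem.Str.join "=" left, PySem.Str.join "=" right)

-- ===== PRECONDITION & SPEC =====
def Spec_split_assignment (statement : String) (out : Option (String × String)) : Prop := out = split_assignment_alt statement
instance (statement : String) (out : Option (String × String)) : Decidable (Spec_split_assignment statement out) := by unfold Spec_split_assignment; infer_instance

-- ===== CLAIM (what is proved, stated in full; the proofs are below) =====
def Claim_equal_split_assignment : Prop := ∀ (statement : String), Dom_split_assignment statement → Spec_split_assignment statement (split_assignment statement)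

-- ===== LEMMAS AND PROOFS =====

-- character-level scan capturing A's loop: prev carried along, left part accumulated
def pvPrevOk : Option Char → Bool
  | none => false
  | some c => !((['<', '>', '!', '='] : List Char).contains c)

def pvScanA (prev : Option Char) : List Char → Option (List Char × List Char)
  | [] => none
  | c :: rest =>
    if (c == '=') && pvPrevOk prev && !(rest.head? == some '=') then some ([], rest)
    else (pvScanA (some c) rest).map (fun pr => (c :: pr.1, pr.2))

-- reference single-char split (no fuel), bridged to PySem.Chars.splitOn below
def pvSplit : List Char → List Char → List (List Char)
  | cur, [] => [cur]
  | cur, a :: rest => if a = '=' then cur :: pvSplit [] rest else pvSplit (cur ++ [a]) rest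

-- segment-level scan capturing B's recursion, on raw char lists
def pvPartOk (p q : List Char) (restTail : List (List Char)) : Bool :=
  (!p.isEmpty) && !((['<', '>', '!'] : List Char).contains (p.getLastD ' ')) && (!q.isEmpty || restTail.isEmpty)

def pvPartScan : List (List Char) → Option (List (List Char) × List (List Char))
  | [] => none
  | [_] => none
  | p :: q :: restTail =>
    if pvPartOk p q restTail then some ([p], q :: restTail)
    else (pvPartScan (q :: restTail)).map (fun pr => (p :: pr.1, pr.2))

def pvPrevAt (cs : List Char) : Nat → Option Char
  | 0 => none
  | k + 1 => cs[k]?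

def pvPrevAfter (prev : Option Char) (p : List Char) : Option Char := p.getLast?.or prev

lemma pv_isIn_single4 (c : Char) :
    PySem.Str.isIn (String.ofList [c]) "<>!=" = (['<', '>', '!', '='] : List Char).contains c := by
  have h : "<>!=".toList = ['<', '>', '!', '='] := by decide
  simp only [PySem.Str.isIn, String.toList_ofList, h]
  simp only [PySem.Chars.isIn, PySem.Chars.find, PySem.Chars.find.go, List.isPrefixOf, List.contains_eq_mem]
  rcases Decidable.em (c = '<') with h1 | h1 <;> rcases Decidable.em (c = '>') with h2 | h2 <;>
    rcases Decidable.em (c = '!') with h3 | h3 <;> rcases Decidable.em (c = '=') with h4 | h4 <;>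
    simp_all


lemma pv_isIn_single3 (c : Char) :
    PySem.Str.isIn (String.ofList [c]) "<>!" = (['<', '>', '!'] : List Char).contains c := by
  have h : "<>!".toList = ['<', '>', '!'] := by decide
  simp only [PySem.Str.isIn, String.toList_ofList, h]
  simp only [PySem.Chars.isIn, PySem.Chars.find, PySem.Chars.find.go, List.isPrefixOf, List.contains_eq_mem]
  rcases Decidable.em (c = '<') with h1 | h1 <;> rcases Decidable.em (c = '>') with h2 | h2 <;>
    rcases Decidable.em (c = '!') with h3 | h3 <;>
    simp_all


lemma pv_beq_single_eq (c : Char) : ((String.ofList [c]) == "=") = (c == '=') := by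
  by_cases h : c = '='
  · subst h; decide
  · have h1 : (c == '=') = false := by simp [h]
    have h2 : (String.ofList [c] == "=") = false := by
      apply beq_eq_false_iff_ne.mpr
      intro hcontra
      have := congrArg String.toList hcontra
      simp at this
      exact h this
    rw [h1, h2]


lemma pv_ofList_beq_empty (p : List Char) : (String.ofList p == "") = p.isEmpty := by
  cases p with
  | nil => decide
  | cons a t =>
    have h2 : (String.ofList (a :: t) == "") = false := by
      apply beq_eq_false_iff_ne.mpr
      intro hcontra
      have := congrArg String.toList hcontra
      simp at this
    simp [h2]


lemma pv_pyGetD_neg_one (xs : List Char) (d : Char) :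
    PySem.List.pyGetD xs (-1) d = xs.getLastD d := by
  simp only [PySem.List.pyGetD, PySem.List.pyGet?, PySem.List.pyIdx?]
  by_cases h : xs = []
  · subst h; simp
  · have hn : 0 < xs.length := List.length_pos_of_ne_nil h
    have h1 : ¬ ((0 : Int) ≤ -1) := by omega
    have h2 : -(xs.length : Int) ≤ -1 := by omega
    have h3 : (-(-1 : Int)).toNat = 1 := by decide
    simp only [h1, if_false, h2, if_true, h3, Option.bind_some]
    rw [← List.getLast?_eq_getElem?, List.getLastD_eq_getLast?]


lemma pvScanA_nil (prev : Option Char) : pvScanA prev [] = none := rfl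

lemma pvScanA_cons (prev : Option Char) (c : Char) (rest : List Char) :
    pvScanA prev (c :: rest) =
      if (c == '=') && pvPrevOk prev && !(rest.head? == some '=') then some ([], rest)
      else (pvScanA (some c) rest).map (fun pr => (c :: pr.1, pr.2)) := rfl

lemma pvPrevAfter_nil (prev : Option Char) : pvPrevAfter prev [] = prev := rfl

lemma pvPrevAfter_cons (prev : Option Char) (c : Char) (p : List Char) :
    pvPrevAfter prev (c :: p) = pvPrevAfter (some c) p := by
  unfold pvPrevAfter
  cases p with
  | nil => simp
  | cons b l' =>
    rw [List.getLast?_cons_cons]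
    obtain ⟨z, hz⟩ := Option.isSome_iff_exists.mp (List.getLast?_isSome.mpr (by simp : (b :: l') ≠ []))
    rw [hz]
    rfl

lemma pv_prevOk_after (p : List Char) (hp : '=' ∉ p) (prev : Option Char)
    (hprev : pvPrevOk prev = false) :
    pvPrevOk (pvPrevAfter prev p) =
      ((!p.isEmpty) && !((['<', '>', '!'] : List Char).contains (p.getLastD ' '))) := by
  cases hp' : p.getLast? with
  | none =>
    have hpe : p = [] := List.getLast?_eq_none_iff.mp hp'
    subst hpe
    simp [pvPrevAfter, hprev]
  | some x =>
    have hpe : p ≠ [] := by intro h; subst h; simp at hp'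
    have hx : x ∈ p := List.mem_of_getLast? hp'
    have hxne : x ≠ '=' := fun h => hp (h ▸ hx)
    unfold pvPrevAfter
    rw [hp']
    have hD : p.getLastD ' ' = x := by rw [List.getLastD_eq_getLast?, hp']; rfl
    have hE : p.isEmpty = false := by simp [hpe]
    rw [hD, hE]
    simp only [Option.or, pvPrevOk]
    congr 1
    simp [List.contains_eq_mem, hxne]

lemma pv_joinHead (q : List Char) (rt : List (List Char)) (hq : '=' ∉ q) :
    ((PySem.Chars.join ['='] (q :: rt)).head? == some '=') = (q.isEmpty && !rt.isEmpty) := by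
  cases q with
  | nil =>
    cases rt with
    | nil => rw [PySem.Chars.join_singleton]; decide
    | cons r rs => rw [PySem.Chars.join_cons_cons]; simp
  | cons b bs =>
    have hb : b ≠ '=' := fun h => hq (h ▸ List.mem_cons_self)
    cases rt with
    | nil => rw [PySem.Chars.join_singleton]; simp [hb]
    | cons r rs => rw [PySem.Chars.join_cons_cons]; simp [hb]

-- ---- A side: the enumerate loop is pvScanA ----

lemma pv_guardA (s : String) (k : Nat) (t : List Char) (hk : k < s.toList.length)
    (ht : s.toList.drop (k + 1) = t) :
    (PySem.Str.isIn (if (k : Int) > 0 then String.ofList [PySem.List.pyGetD s.toList ((k : Int) - 1) ' '] else "") "<>!=" ||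
      ((if (k : Int) + 1 < PySem.Str.len s then String.ofList [PySem.List.pyGetD s.toList ((k : Int) + 1) ' '] else "") == "=")) =
    !(pvPrevOk (pvPrevAt s.toList k) && !(t.head? == some '=')) := by
  have hnxt : ((if (k : Int) + 1 < PySem.Str.len s then String.ofList [PySem.List.pyGetD s.toList ((k : Int) + 1) ' '] else "") == "=")
      = (t.head? == some '=') := by
    have hth : t.head? = s.toList[k + 1]? := by rw [← ht, List.head?_drop]
    rw [hth]
    by_cases hlt : k + 1 < s.toList.length
    · have hcond : (k : Int) + 1 < PySem.Str.len s := by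
        rw [PySem.Str.len_eq]; exact_mod_cast hlt
      have hcast : (k : Int) + 1 = ((k + 1 : Nat) : Int) := by push_cast; ring
      rw [if_pos hcond, hcast, PySem.List.pyGetD_natCast, pv_beq_single_eq]
      rw [List.getElem?_eq_getElem hlt, List.getD_eq_getElem?_getD, List.getElem?_eq_getElem hlt]
      simp
    · have hcond : ¬ ((k : Int) + 1 < PySem.Str.len s) := by
        rw [PySem.Str.len_eq]; omega
      rw [if_neg hcond, List.getElem?_eq_none (by omega)]
      decide
  rw [hnxt]
  cases k with
  | zero =>
    have h0 : ¬ (((0 : Nat) : Int) > 0) := by omega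
    rw [if_neg h0]
    have : PySem.Str.isIn "" "<>!=" = true := by decide
    rw [this]
    simp [pvPrevAt, pvPrevOk]
  | succ m =>
    have hm : m < s.toList.length := by omega
    have hpos : ((m + 1 : Nat) : Int) > 0 := by positivity
    have hcast : ((m + 1 : Nat) : Int) - 1 = ((m : Nat) : Int) := by omega
    rw [if_pos hpos, hcast, PySem.List.pyGetD_natCast, pv_isIn_single4]
    have hat : pvPrevAt s.toList (m + 1) = some s.toList[m] := by
      simp [pvPrevAt, List.getElem?_eq_getElem hm]
    have hgd : s.toList.getD m ' ' = s.toList[m] := by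
      rw [List.getD_eq_getElem?_getD, List.getElem?_eq_getElem hm]; rfl
    rw [hat, hgd]
    simp only [pvPrevOk]
    cases (['<', '>', '!', '='] : List Char).contains s.toList[m] <;>
      cases (t.head? == some '=') <;> decide


lemma pv_loopA_scan (s : String) (k : Nat) (l : List Char) (hd : s.toList.drop k = l) :
    splitAssignLoopA s (PySem.List.enumerate l (k : Int)) =
      (pvScanA (pvPrevAt s.toList k) l).map
        (fun pr => (String.ofList (s.toList.take k ++ pr.1), String.ofList pr.2)) := by
  induction l generalizing k with
  | nil => simp [PySem.List.enumerate, splitAssignLoopA, pvScanA]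
  | cons c t ih =>
    have hlen := congrArg List.length hd
    simp only [List.length_drop, List.length_cons] at hlen
    have hk : k < s.toList.length := by omega
    have hck : s.toList[k]? = some c := by
      have : (s.toList.drop k)[0]? = some c := by rw [hd]; simp
      simpa using this
    have hd' : s.toList.drop (k + 1) = t := by
      have : (s.toList.drop k).tail = t := by rw [hd]; rfl
      simpa [List.tail_drop] using this
    have htake : s.toList.take (k + 1) = s.toList.take k ++ [c] := by
      rw [List.take_add_one, hck]
      rfl
    have hih := ih (k + 1) hd'
    rw [show ((k + 1 : Nat) : Int) = (k : Int) + 1 from by push_cast; ring] at hih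
    rw [PySem.List.enumerate_cons, splitAssignLoopA.eq_2, pvScanA_cons]
    by_cases hc : c = '='
    · subst hc
      simp only [ne_eq, not_true_eq_false, if_false]
      rw [pv_guardA s k t hk hd']
      cases hg : (pvPrevOk (pvPrevAt s.toList k) && !(t.head? == some '=')) with
      | false =>
        simp only [Bool.not_false, if_true, beq_self_eq_true, Bool.true_and, hg,
          Bool.false_eq_true, if_false]
        rw [hih]
        have hat : pvPrevAt s.toList (k + 1) = some '=' := by simp [pvPrevAt, hck]
        rw [hat]
        cases pvScanA (some '=') t <;> simp [htake]
      | true =>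
        simp only [Bool.not_true, Bool.false_eq_true, if_false, beq_self_eq_true,
          Bool.true_and, hg, if_true]
        rw [Option.map_some]
        have h1 : PySem.Str.slice s none (some (k : Int)) = String.ofList (s.toList.take k ++ []) := by
          rw [PySem.Str.slice, PySem.Chars.slice,
            PySem.List.slice_to _ (by omega : (0 : Int) ≤ (k : Int))]
          simp
        have h2 : PySem.Str.slice s (some ((k : Int) + 1)) none = String.ofList t := by
          have hcast : (k : Int) + 1 = ((k + 1 : Nat) : Int) := by push_cast; ring
          rw [PySem.Str.slice, PySem.Chars.slice, hcast,
            PySem.List.slice_from _ (by omega : (0 : Int) ≤ ((k + 1 : Nat) : Int))]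
          rw [Int.toNat_natCast, hd']
        rw [h1, h2]
    · have hcb : (c == '=') = false := by simp [hc]
      simp only [ne_eq, hc, not_false_iff, if_true, hcb, Bool.false_and,
        Bool.false_eq_true, if_false]
      rw [hih]
      have hat : pvPrevAt s.toList (k + 1) = some c := by simp [pvPrevAt, hck]
      rw [hat]
      cases pvScanA (some c) t <;> simp [htake]


lemma pv_A_char (s : String) :
    split_assignment s =
      (pvScanA none s.toList).map (fun pr => (String.ofList pr.1, String.ofList pr.2)) := by
  have h := pv_loopA_scan s 0 s.toList (by simp)
  rw [split_assignment]
  have h0 : ((0 : Nat) : Int) = (0 : Int) := rfl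
  rw [h0] at h
  rw [h]
  have hat : pvPrevAt s.toList 0 = none := rfl
  rw [hat]
  cases pvScanA none s.toList <;> simp


-- ---- pvScanA over a joined segment list is pvPartScan ----

lemma pv_scanA_append (p : List Char) (hp : '=' ∉ p) (prev : Option Char) (l : List Char) :
    pvScanA prev (p ++ l) =
      (pvScanA (pvPrevAfter prev p) l).map (fun pr => (p ++ pr.1, pr.2)) := by
  induction p generalizing prev with
  | nil =>
    rw [pvPrevAfter_nil, List.nil_append]
    cases pvScanA prev l <;> simp
  | cons c p' ih =>
    have hc : c ≠ '=' := fun h => hp (h ▸ List.mem_cons_self)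
    have hp' : '=' ∉ p' := fun h => hp (List.mem_cons_of_mem _ h)
    have hcb : (c == '=') = false := by simp [hc]
    rw [List.cons_append, pvScanA_cons, hcb]
    simp only [Bool.false_and, Bool.false_eq_true, if_false]
    rw [ih hp' (some c), pvPrevAfter_cons]
    cases pvScanA (pvPrevAfter (some c) p') l <;> simp


lemma pv_partScan_fst_ne_nil (parts : List (List Char)) (pr : List (List Char) × List (List Char))
    (h : pvPartScan parts = some pr) : pr.1 ≠ [] := by
  induction parts with
  | nil => simp [pvPartScan] at h
  | cons p rest ih =>
    cases rest with
    | nil => simp [pvPartScan] at h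
    | cons q rt =>
      rw [pvPartScan] at h
      split_ifs at h with hok
      · cases h; simp
      · cases hrec : pvPartScan (q :: rt) with
        | none => rw [hrec] at h; simp at h
        | some pr' => rw [hrec] at h; simp at h; rw [← h]; simp


lemma pv_glue (parts : List (List Char)) (hfree : ∀ p ∈ parts, '=' ∉ p)
    (prev : Option Char) (hprev : pvPrevOk prev = false) :
    pvScanA prev (PySem.Chars.join ['='] parts) =
      (pvPartScan parts).map
        (fun pr => (PySem.Chars.join ['='] pr.1, PySem.Chars.join ['='] pr.2)) := by
  induction parts generalizing prev with
  | nil => simp [PySem.Chars.join_nil, pvScanA, pvPartScan]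
  | cons p rest ih =>
    cases rest with
    | nil =>
      rw [PySem.Chars.join_singleton]
      have hnone : pvScanA prev p = none := by
        have := pv_scanA_append p (hfree p (by simp)) prev []
        simpa [pvScanA_nil] using this
      simp [hnone, pvPartScan]
    | cons q rt =>
      have hp := hfree p (by simp)
      have hq := hfree q (by simp)
      rw [PySem.Chars.join_cons_cons]
      have happ : p ++ ['='] ++ PySem.Chars.join ['='] (q :: rt) =
          p ++ ('=' :: PySem.Chars.join ['='] (q :: rt)) := by simp
      rw [happ, pv_scanA_append p hp, pvScanA_cons,
        pv_prevOk_after p hp prev hprev, pv_joinHead q rt hq]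
      have hcond : ((('=' == '=') && ((!p.isEmpty) && !((['<', '>', '!'] : List Char).contains (p.getLastD ' '))) && !(q.isEmpty && !rt.isEmpty)) : Bool) = pvPartOk p q rt := by
        simp only [pvPartOk]
        cases p.isEmpty <;> cases (['<', '>', '!'] : List Char).contains (p.getLastD ' ') <;>
          cases q.isEmpty <;> cases rt.isEmpty <;> decide
      rw [hcond, pvPartScan]
      cases hok : pvPartOk p q rt with
      | true =>
        simp only [if_true, Option.map_some]
        rw [PySem.Chars.join_singleton]
        simp
      | false =>
        simp only [Bool.false_eq_true, if_false]
        have hprev' : pvPrevOk (some '=') = false := by decide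
        rw [ih (fun r hr => hfree r (List.mem_cons_of_mem _ hr)) (some '=') hprev']
        cases hrec : pvPartScan (q :: rt) with
        | none => simp
        | some pr =>
          obtain ⟨x, xs, hx⟩ := List.exists_cons_of_ne_nil (pv_partScan_fst_ne_nil _ _ hrec)
          simp only [Option.map_some]
          rw [hx, PySem.Chars.join_cons_cons, ← hx]
          simp


-- ---- splitOn bridge and pvSplit facts ----

lemma pvSplit_nil (cur : List Char) : pvSplit cur [] = [cur] := rfl

lemma pvSplit_cons_eq (cur rest : List Char) : pvSplit cur ('=' :: rest) = cur :: pvSplit [] rest := by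
  simp [pvSplit]

lemma pvSplit_cons_ne (cur rest : List Char) (a : Char) (ha : a ≠ '=') :
    pvSplit cur (a :: rest) = pvSplit (cur ++ [a]) rest := by
  simp [pvSplit, ha]

lemma pv_go_single (fuel : Nat) :
    ∀ (l cur : List Char) (acc : List (List Char)), l.length < fuel →
    PySem.Chars.splitOn.go ['='] fuel l cur acc = acc.reverse ++ pvSplit cur.reverse l := by
  induction fuel with
  | zero => intro l cur acc h; omega
  | succ f ih =>
    intro l cur acc h
    cases l with
    | nil =>
      rw [PySem.Chars.splitOn.go.eq_2 _ _ _ _ (by omega)]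
      simp [pvSplit]
    | cons a rest =>
      rw [PySem.Chars.splitOn.go.eq_3]
      have hpre : (['='] : List Char).isPrefixOf (a :: rest) = ('=' == a) := by
        simp [List.isPrefixOf]
      rw [hpre]
      by_cases ha : a = '='
      · subst ha
        simp only [beq_self_eq_true, if_true]
        have hdrop : List.drop (['='] : List Char).length ('=' :: rest) = rest := by simp
        rw [hdrop, ih rest [] (cur.reverse :: acc) (by simp at h; omega)]
        rw [pvSplit_cons_eq]
        simp
      · have hne : ('=' == a) = false := by simp [Ne.symm ha]
        rw [hne]
        simp only [Bool.false_eq_true, if_false]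
        rw [ih rest (a :: cur) acc (by simpa using Nat.lt_of_succ_lt_succ h)]
        rw [pvSplit_cons_ne _ _ _ ha]
        simp


lemma pv_splitOn_eq (cs : List Char) : PySem.Chars.splitOn cs ['='] = pvSplit [] cs := by
  rw [PySem.Chars.splitOn, pv_go_single (cs.length + 1) cs [] [] (by omega)]
  simp


lemma pv_split_ne_nil (l cur : List Char) : pvSplit cur l ≠ [] := by
  induction l generalizing cur with
  | nil => simp [pvSplit]
  | cons a rest ih =>
    by_cases ha : a = '='
    · subst ha; rw [pvSplit_cons_eq]; simp
    · rw [pvSplit_cons_ne _ _ _ ha]; exact ih (cur ++ [a])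


lemma pv_join_split (l : List Char) : ∀ cur, PySem.Chars.join ['='] (pvSplit cur l) = cur ++ l := by
  induction l with
  | nil => intro cur; simp [pvSplit, PySem.Chars.join_singleton]
  | cons a rest ih =>
    intro cur
    by_cases ha : a = '='
    · subst ha
      obtain ⟨x, xs, hx⟩ := List.exists_cons_of_ne_nil (pv_split_ne_nil rest [])
      rw [pvSplit_cons_eq, hx, PySem.Chars.join_cons_cons, ← hx, ih []]
      simp
    · rw [pvSplit_cons_ne _ _ _ ha, ih (cur ++ [a])]
      simp


lemma pv_split_free (l : List Char) :
    ∀ cur, '=' ∉ cur → ∀ p ∈ pvSplit cur l, '=' ∉ p := by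
  induction l with
  | nil => intro cur hc p hp; rw [pvSplit_nil] at hp; simp at hp; subst hp; exact hc
  | cons a rest ih =>
    intro cur hc p hp
    by_cases ha : a = '='
    · subst ha
      rw [pvSplit_cons_eq] at hp
      simp only [List.mem_cons] at hp
      rcases hp with rfl | hp
      · exact hc
      · exact ih [] (by simp) p hp
    · rw [pvSplit_cons_ne _ _ _ ha] at hp
      have hc' : '=' ∉ cur ++ [a] := by
        simp only [List.mem_append, List.mem_singleton]
        rintro (h | h)
        · exact hc h
        · exact ha h.symm
      exact ih (cur ++ [a]) hc' p hp


-- ---- B side: scanBParts over mapped segments is pvPartScan ----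

lemma pv_scanB_map (L : List (List Char)) :
    scanBParts (L.map String.ofList) =
      (pvPartScan L).map (fun pr => (pr.1.map String.ofList, pr.2.map String.ofList)) := by
  induction L with
  | nil => simp [scanBParts, pvPartScan]
  | cons p rest ih =>
    cases rest with
    | nil => simp [scanBParts, pvPartScan]
    | cons q rt =>
      simp only [List.map_cons]
      rw [scanBParts, pvPartScan]
      have h1 : (String.ofList p != "") = !p.isEmpty := by
        rw [bne, pv_ofList_beq_empty]
      have h2 : PySem.List.pyGetD (String.ofList p).toList (-1) ' ' = p.getLastD ' ' := by
        rw [String.toList_ofList, pv_pyGetD_neg_one]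
      have h3 : (String.ofList q != "") = !q.isEmpty := by
        rw [bne, pv_ofList_beq_empty]
      have h4 : (List.map String.ofList rt).isEmpty = rt.isEmpty := by
        cases rt <;> simp
      rw [h1, h2, h3, h4, pv_isIn_single3,
        show (String.ofList q :: List.map String.ofList rt) = List.map String.ofList (q :: rt) from rfl, ih]
      unfold pvPartOk
      split_ifs with hok
      · simp
      · cases pvPartScan (q :: rt) <;> simp


lemma pv_join_map (L : List (List Char)) :
    PySem.Str.join "=" (L.map String.ofList) = String.ofList (PySem.Chars.join ['='] L) := by
  rw [PySem.Str.join]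
  have hsep : "=".toList = ['='] := by decide
  rw [hsep, List.map_map]
  have h : ∀ (M : List (List Char)), List.map (String.toList ∘ String.ofList) M = M := by
    intro M
    induction M with
    | nil => rfl
    | cons a t iht => simp only [List.map_cons, Function.comp_apply, String.toList_ofList, iht]
  rw [h]


lemma pv_B_char (s : String) :
    split_assignment_alt s =
      (pvPartScan (pvSplit [] s.toList)).map
        (fun pr => (String.ofList (PySem.Chars.join ['='] pr.1),
                    String.ofList (PySem.Chars.join ['='] pr.2))) := by
  have hsplit : PySem.Str.split? s "=" = some ((pvSplit [] s.toList).map String.ofList) := by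
    rw [PySem.Str.split?, PySem.Chars.split?]
    have hsep : "=".toList = ['='] := by decide
    rw [hsep]
    simp [pv_splitOn_eq]
  unfold split_assignment_alt
  simp only [hsplit]
  rw [pv_scanB_map]
  cases pvPartScan (pvSplit [] s.toList) with
  | none => simp
  | some pr => simp [pv_join_map]


-- ===== VERDICT (by name: the statement is the Claim_ definition above) =====
theorem split_assignment_spec : Claim_equal_split_assignment := by
  intro s _
  show split_assignment s = split_assignment_alt s
  rw [pv_A_char, pv_B_char]
  have hcs : PySem.Chars.join ['='] (pvSplit [] s.toList) = s.toList := pv_join_split s.toList []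
  have hfree : ∀ p ∈ pvSplit [] s.toList, '=' ∉ p :=
    pv_split_free s.toList [] (by simp)
  conv_lhs => rw [← hcs, pv_glue _ hfree none rfl]
  cases pvPartScan (pvSplit [] s.toList) <;> simp
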